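-- pv_equiv track=rewrite | github.com/junsooki/LAMAPF-P-Config | src/py/utils.py | validate_paths
-- ===== SOURCE A (Python) =====
-- from typing import Dict, List, Tuple
--
-- def validate_paths(paths: Dict[int, List[Tuple[int, int]]], grid: List[List[int]]) -> bool:
--     if not paths:
--         return True
--     height = len(grid)
--     width = len(grid[0]) if height > 0 else 0
--     max_len = max(len(p) for p in paths.values())
--     for t in range(max_len):
--         occupied = set()
--         for rid, path in paths.items():
--             if t >= len(path):
--                 continue
--             x, y = path[t]
--             if x < 0 or y < 0 or x >= width or y >= height:
--                 return False
--             if grid[y][x] != 0: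
--                 return False
--             if (x, y) in occupied:
--                 return False
--             occupied.add((x, y))
--     return True
-- ===== SOURCE B (Python) =====
-- def validate_paths(paths, grid):
--     height = len(grid)
--     width = len(grid[0]) if grid else 0
--     cells = [(t, xy) for path in paths.values() for t, xy in enumerate(path)]
--     for _, (x, y) in cells:
--         if x < 0 or y < 0 or x >= width or y >= height or grid[y][x] != 0:
--             return False
--     return len(set(cells)) == len(cells)
-- ===== Notes on version B (the rewrite author's own statement) =====
-- stated objective: alternative
-- what changed: Instead of sweeping every timestep over every agent (skipping finished ones) with a per-step occupied set, B flattens all paths into one list of (timestep, cell) pairs in a single pass, validates each cell once, and detects collisions as duplicate (timestep, cell) pairs via one set construction; it trades A's timestep-major O(max_len*num_agents) sweep for a cell-major O(total path cells) pass (no measured speed-up on balanced path lengths).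
-- outside the precondition, e.g. on validate_paths({0: [(0, 0)], 1: [(0, 0), (1, 1)]}, [[0, 0], [0]]): A returns False, B raises IndexError
import Mathlib
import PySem

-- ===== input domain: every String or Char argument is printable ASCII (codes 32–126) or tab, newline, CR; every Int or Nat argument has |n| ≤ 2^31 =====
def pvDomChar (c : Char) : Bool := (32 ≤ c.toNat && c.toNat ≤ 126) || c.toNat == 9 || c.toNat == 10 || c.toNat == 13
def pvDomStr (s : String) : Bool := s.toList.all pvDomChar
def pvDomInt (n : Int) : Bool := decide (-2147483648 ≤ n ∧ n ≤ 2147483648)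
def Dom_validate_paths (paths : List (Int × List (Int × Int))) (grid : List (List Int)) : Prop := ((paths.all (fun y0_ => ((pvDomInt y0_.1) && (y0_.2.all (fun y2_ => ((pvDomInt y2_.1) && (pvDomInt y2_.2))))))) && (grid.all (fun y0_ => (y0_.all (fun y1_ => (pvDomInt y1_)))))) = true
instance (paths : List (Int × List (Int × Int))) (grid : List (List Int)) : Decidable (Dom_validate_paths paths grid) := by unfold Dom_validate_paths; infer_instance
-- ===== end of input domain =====

-- Alternative implementation: B replaces A's timestep-major sweep over all agents by one
-- cell-major pass over the flattened (timestep, cell) pairs; collisions become duplicate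
-- pairs, found by a single set construction.
-- ===== PORT A =====
-- inner loop over paths.items() at one timestep t, with the occupied set
def vaInner (grid : List (List Int)) (width height : Int) (t : Nat) :
    List (Int × List (Int × Int)) → PySem.Set (Int × Int) → Bool
  | [], _ => true
  | (_, path) :: rest, occ =>
    if path.length ≤ t then vaInner grid width height t rest occ
    else
      let xy := (PySem.List.pyGet? path (t : Int)).getD (0, 0)
      if xy.1 < 0 ∨ xy.2 < 0 ∨ xy.1 ≥ width ∨ xy.2 ≥ height then false
      else if (PySem.List.pyGet? ((PySem.List.pyGet? grid xy.2).getD []) xy.1).getD 0 ≠ 0 then false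
      else if PySem.Set.contains occ xy then false
      else vaInner grid width height t rest (PySem.Set.add occ xy)

-- outer loop 'for t in range(max_len)'
def vaOuter (grid : List (List Int)) (width height : Int)
    (paths : List (Int × List (Int × Int))) : List Nat → Bool
  | [] => true
  | t :: ts =>
    if vaInner grid width height t paths PySem.Set.empty then
      vaOuter grid width height paths ts
    else false

def validate_paths (paths : List (Int × List (Int × Int))) (grid : List (List Int)) : Bool :=
  if paths = [] then true
  else
    let height : Int := grid.length
    let width : Int := if grid.length > 0 then ((grid.headD []).length : Int) else 0
    let maxLen : Nat := (paths.map (fun p => p.2.length)).foldl max 0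
    vaOuter grid width height paths (List.range maxLen)

-- ===== PORT B =====
-- single validity pass over the flattened (timestep, cell) list
def vbValid (grid : List (List Int)) (width height : Int) :
    List (Int × (Int × Int)) → Bool
  | [] => true
  | (_, xy) :: rest =>
    if xy.1 < 0 ∨ xy.2 < 0 ∨ xy.1 ≥ width ∨ xy.2 ≥ height then false
    else if (PySem.List.pyGet? ((PySem.List.pyGet? grid xy.2).getD []) xy.1).getD 0 ≠ 0 then false
    else vbValid grid width height rest

def validate_paths_alt (paths : List (Int × List (Int × Int))) (grid : List (List Int)) : Bool :=
  let height : Int := grid.length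
  let width : Int := if grid ≠ [] then ((grid.headD []).length : Int) else 0
  let cells := paths.flatMap (fun p => PySem.List.enumerate p.2 0)
  vbValid grid width height cells &&
    (PySem.Set.len (PySem.Set.ofList cells) == cells.length)

-- ===== PRECONDITION & SPEC =====
-- Pre_ excludes (a) list arguments with duplicate agent ids, which no Python dict can
-- represent, and (b) grids whose row y is shorter than row 0 while some path cell (x,y)
-- is in bounds: there Python indexes grid[y][x] into the short row and raises IndexError
-- (A may also return False first if an earlier violation is hit; see the cite).
def Pre_validate_paths (paths : List (Int × List (Int × Int))) (grid : List (List Int)) : Prop :=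
  (paths.map Prod.fst).Nodup ∧
  ∀ p ∈ paths, ∀ c ∈ p.2,
    (0 ≤ c.1 ∧ c.1 < ((grid.headD []).length : Int) ∧ 0 ≤ c.2 ∧ c.2 < (grid.length : Int)) →
      c.1 < ((grid.getD c.2.toNat []).length : Int)
instance (paths : List (Int × List (Int × Int))) (grid : List (List Int)) : Decidable (Pre_validate_paths paths grid) := by unfold Pre_validate_paths; infer_instance

def pvWitness_validate_paths : (List (Int × List (Int × Int))) × List (List Int) :=
  ([(0, [(0, 0), (1, 1)]), (1, [(1, 0), (0, 1)])], [[0, 0], [0, 0]])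

def Spec_validate_paths (paths : List (Int × List (Int × Int))) (grid : List (List Int)) (out : Bool) : Prop := out = validate_paths_alt paths grid
instance (paths : List (Int × List (Int × Int))) (grid : List (List Int)) (out : Bool) : Decidable (Spec_validate_paths paths grid out) := by unfold Spec_validate_paths; infer_instance

-- ===== CLAIM (what is proved, stated in full; the proofs are below) =====
def Claim_equal_validate_paths : Prop := ∀ (paths : List (Int × List (Int × Int))) (grid : List (List Int)), Dom_validate_paths paths grid → Pre_validate_paths paths grid → Spec_validate_paths paths grid (validate_paths paths grid)

-- ===== LEMMAS AND PROOFS =====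

-- the cells occupied at timestep t, in agent order
def cellsAt (t : Nat) (paths : List (Int × List (Int × Int))) : List (Int × Int) :=
  paths.filterMap (fun p => p.2[t]?)

-- the shared per-cell validity check (bounds + free grid cell)
def cellOK (grid : List (List Int)) (width height : Int) (c : Int × Int) : Prop :=
  ¬ (c.1 < 0 ∨ c.2 < 0 ∨ c.1 ≥ width ∨ c.2 ≥ height) ∧
  (PySem.List.pyGet? ((PySem.List.pyGet? grid c.2).getD []) c.1).getD 0 = 0

theorem foldl_add_length_le {α : Type} [BEq α] [LawfulBEq α] (xs : List α) (s : PySem.Set α) :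
    (xs.foldl PySem.Set.add s).length ≤ s.length + xs.length := by
  induction xs generalizing s with
  | nil => simp
  | cons x xs ih =>
    simp only [List.foldl_cons, List.length_cons]
    calc (xs.foldl PySem.Set.add (PySem.Set.add s x)).length
        ≤ (PySem.Set.add s x).length + xs.length := ih _
      _ ≤ s.length + (xs.length + 1) := by
          simp only [PySem.Set.add]; split <;> simp <;> omega

theorem foldl_add_length_iff {α : Type} [BEq α] [LawfulBEq α] (xs : List α) (s : PySem.Set α) :
    (xs.foldl PySem.Set.add s).length = s.length + xs.length ↔
      (xs.Nodup ∧ ∀ x ∈ xs, x ∉ s) := by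
  induction xs generalizing s with
  | nil => simp
  | cons x xs ih =>
    simp only [List.foldl_cons, List.length_cons, List.nodup_cons, List.mem_cons]
    by_cases hx : x ∈ s
    · have hadd : PySem.Set.add s x = s := by
        simp [PySem.Set.add, hx]
      rw [hadd]
      constructor
      · intro h
        have := foldl_add_length_le xs s
        omega
      · rintro ⟨-, hall⟩
        exact absurd hx (hall x (Or.inl rfl))
    · have hadd : PySem.Set.add s x = s ++ [x] := by
        simp [PySem.Set.add, hx]
      have key := ih (s ++ [x])
      simp only [List.length_append, List.length_singleton] at key
      rw [hadd, show s.length + (xs.length + 1) = s.length + 1 + xs.length from by omega, key]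
      constructor
      · rintro ⟨hnd, hall⟩
        have h1 : x ∉ xs := fun hmem => by
          have := hall x hmem
          simp at this
        refine ⟨⟨h1, hnd⟩, ?_⟩
        rintro y (rfl | hy)
        · exact hx
        · intro hys
          exact (hall y hy) (by simp [hys])
      · rintro ⟨⟨hxs, hnd⟩, hall⟩
        refine ⟨hnd, ?_⟩
        intro y hy
        simp only [List.mem_append, List.mem_singleton]
        rintro (hys | rfl)
        · exact hall y (Or.inr hy) hys
        · exact hxs hy

theorem ofList_length_iff {α : Type} [BEq α] [LawfulBEq α] (xs : List α) :
    (PySem.Set.ofList xs).length = xs.length ↔ xs.Nodup := by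
  rw [PySem.Set.ofList_eq_foldl]
  have h := foldl_add_length_iff xs ([] : PySem.Set α)
  simp only [List.length_nil, Nat.zero_add, List.not_mem_nil, not_false_iff, implies_true,
    and_true] at h
  exact h

theorem mem_flat_iff (paths : List (Int × List (Int × Int))) (i : Int) (c : Int × Int) :
    (i, c) ∈ paths.flatMap (fun p => PySem.List.enumerate p.2 0) ↔
      ∃ t : Nat, i = (t : Int) ∧ c ∈ cellsAt t paths := by
  simp only [List.mem_flatMap, PySem.List.mem_enumerate_iff, cellsAt, List.mem_filterMap]
  constructor
  · rintro ⟨p, hp, k, hk, heq⟩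
    rw [Prod.mk.injEq] at heq
    obtain ⟨h1, h2⟩ := heq
    refine ⟨k, by omega, p, hp, ?_⟩
    rw [h2]
    exact List.getElem?_eq_getElem hk
  · rintro ⟨t, rfl, p, hp, hget⟩
    obtain ⟨ht, rfl⟩ := List.getElem?_eq_some_iff.mp hget
    exact ⟨p, hp, t, ht, by simp⟩

theorem flat_nodup_iff (paths : List (Int × List (Int × Int))) :
    (paths.flatMap (fun p => PySem.List.enumerate p.2 0)).Nodup ↔
      ∀ t : Nat, (cellsAt t paths).Nodup := by
  induction paths with
  | nil => simp [cellsAt]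
  | cons p ps ih =>
    rw [List.flatMap_cons, List.nodup_append]
    have henum : (PySem.List.enumerate p.2 0).Nodup :=
      (PySem.List.pairwise_lt_enumerate p.2 0).imp (fun hlt => by
        intro h; rw [h] at hlt; exact lt_irrefl _ hlt)
    have hcells : ∀ t : Nat, cellsAt t (p :: ps) =
        match p.2[t]? with
        | some c => c :: cellsAt t ps
        | none => cellsAt t ps := by
      intro t
      simp only [cellsAt, List.filterMap_cons]
      cases p.2[t]? <;> rfl
    constructor
    · rintro ⟨-, hnd, hdisj⟩
      intro t
      rw [hcells t]
      cases hget : p.2[t]? with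
      | none => exact ih.mp hnd t
      | some c =>
        rw [List.nodup_cons]
        refine ⟨?_, ih.mp hnd t⟩
        intro hc
        obtain ⟨ht, rfl⟩ := List.getElem?_eq_some_iff.mp hget
        have hmem : ((t : Int), p.2[t]) ∈ PySem.List.enumerate p.2 0 := by
          rw [PySem.List.mem_enumerate_iff]
          exact ⟨t, ht, by simp⟩
        exact hdisj _ hmem _ ((mem_flat_iff ps t p.2[t]).mpr ⟨t, rfl, hc⟩) rfl
    · intro hall
      refine ⟨henum, ih.mpr (fun t => ?_), ?_⟩
      · have := hall t
        rw [hcells t] at this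
        cases hget : p.2[t]? with
        | none => rwa [hget] at this
        | some c => rw [hget] at this; exact (List.nodup_cons.mp this).2
      · intro a ha b hb
        obtain ⟨i, c⟩ := a
        obtain ⟨j, d⟩ := b
        rw [PySem.List.mem_enumerate_iff] at ha
        obtain ⟨k, hk, heq⟩ := ha
        rw [Prod.mk.injEq] at heq
        obtain ⟨h1, h2⟩ := heq
        rw [mem_flat_iff] at hb
        obtain ⟨t, hjt, hd⟩ := hb
        intro hab
        rw [Prod.mk.injEq] at hab
        obtain ⟨hij, hcd⟩ := hab
        have hkt : k = t := by omega
        subst hkt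
        have := hall k
        rw [hcells k, List.getElem?_eq_getElem hk] at this
        rw [List.nodup_cons] at this
        exact this.1 (h2 ▸ hcd ▸ hd)

theorem vbValid_iff (grid : List (List Int)) (w h : Int)
    (cells : List (Int × (Int × Int))) :
    vbValid grid w h cells = true ↔ ∀ tc ∈ cells, cellOK grid w h tc.2 := by
  induction cells with
  | nil => simp [vbValid]
  | cons tc rest ih =>
    obtain ⟨t, xy⟩ := tc
    rw [vbValid]
    split_ifs with h1 h2
    · simp only [false_iff]
      intro hall
      exact ((hall (t, xy) (List.mem_cons_self)).1 h1)
    · simp only [false_iff]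
      intro hall
      exact h2 ((hall (t, xy) (List.mem_cons_self)).2)
    · rw [ih]
      constructor
      · intro hall tc' htc'
        rcases List.mem_cons.mp htc' with rfl | hmem
        · exact ⟨h1, not_not.mp h2⟩
        · exact hall tc' hmem
      · intro hall tc' htc'
        exact hall tc' (List.mem_cons_of_mem _ htc')

theorem vaOuter_iff (grid : List (List Int)) (w h : Int)
    (paths : List (Int × List (Int × Int))) (ts : List Nat) :
    vaOuter grid w h paths ts = true ↔
      ∀ t ∈ ts, vaInner grid w h t paths PySem.Set.empty = true := by
  induction ts with
  | nil => simp [vaOuter]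
  | cons t ts ih =>
    rw [vaOuter]
    split_ifs with hi
    · simp only [hi, ih, List.mem_cons, forall_eq_or_imp]
      tauto
    · simp only [false_iff]
      intro hall
      exact hi (hall t List.mem_cons_self)

theorem vaInner_iff (grid : List (List Int)) (w h : Int) (t : Nat)
    (ps : List (Int × List (Int × Int))) (occ : PySem.Set (Int × Int)) :
    vaInner grid w h t ps occ = true ↔
      ((∀ c ∈ cellsAt t ps, cellOK grid w h c ∧ c ∉ occ) ∧ (cellsAt t ps).Nodup) := by
  induction ps generalizing occ with
  | nil => simp [vaInner, cellsAt]
  | cons p rest ih =>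
    obtain ⟨rid, path⟩ := p
    have hcells : cellsAt t ((rid, path) :: rest) =
        match path[t]? with
        | some c => c :: cellsAt t rest
        | none => cellsAt t rest := by
      simp only [cellsAt, List.filterMap_cons]
      cases path[t]? <;> rfl
    rw [vaInner]
    by_cases hlen : path.length ≤ t
    · have hget : path[t]? = none := List.getElem?_eq_none hlen
      rw [if_pos hlen, hcells, hget, ih]
    · rw [if_neg hlen]
      have ht : t < path.length := by omega
      have hget : path[t]? = some path[t] := List.getElem?_eq_getElem ht
      have hpy : (PySem.List.pyGet? path (t : Int)).getD (0, 0) = path[t] := by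
        rw [PySem.List.pyGet?_natCast, hget, Option.getD_some]
      rw [hcells, hget]
      simp only [hpy]
      set c := path[t] with hc
      split_ifs with h1 h2 h3
      · simp only [false_iff]
        intro hall
        exact (hall.1 c (List.mem_cons_self)).1.1 h1
      · simp only [false_iff]
        intro hall
        exact h2 (hall.1 c (List.mem_cons_self)).1.2
      · simp only [false_iff]
        intro hall
        exact (hall.1 c (List.mem_cons_self)).2 ((PySem.Set.contains_iff _ _).mp h3)
      · rw [ih]
        have hcocc : c ∉ occ := fun hm => h3 ((PySem.Set.contains_iff _ _).mpr hm)
        constructor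
        · rintro ⟨hall, hnd⟩
          refine ⟨?_, ?_⟩
          · intro c' hc'
            rcases List.mem_cons.mp hc' with rfl | hmem
            · exact ⟨⟨h1, not_not.mp h2⟩, hcocc⟩
            · have := hall c' hmem
              refine ⟨this.1, fun hmemocc => this.2 ?_⟩
              rw [PySem.Set.mem_add]
              exact Or.inl hmemocc
          · rw [List.nodup_cons]
            refine ⟨fun hmem => ?_, hnd⟩
            have := (hall c hmem).2
            rw [PySem.Set.mem_add] at this
            exact this (Or.inr rfl)
        · rintro ⟨hall, hnd⟩
          rw [List.nodup_cons] at hnd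
          refine ⟨?_, hnd.2⟩
          intro c' hc'
          have := hall c' (List.mem_cons_of_mem _ hc')
          refine ⟨this.1, fun hm => ?_⟩
          rw [PySem.Set.mem_add] at hm
          rcases hm with hm | rfl
          · exact this.2 hm
          · exact hnd.1 hc'


theorem cellsAt_large (paths : List (Int × List (Int × Int))) (t : Nat)
    (h : ∀ p ∈ paths, p.2.length ≤ t) : cellsAt t paths = [] := by
  rw [cellsAt, List.filterMap_eq_nil_iff]
  intro p hp
  exact List.getElem?_eq_none (h p hp)

theorem validate_paths_iff (paths : List (Int × List (Int × Int))) (grid : List (List Int)) :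
    validate_paths paths grid = true ↔
      ∀ t : Nat, (∀ c ∈ cellsAt t paths,
          cellOK grid (if grid.length > 0 then ((grid.headD []).length : Int) else 0)
            (grid.length : Int) c) ∧ (cellsAt t paths).Nodup := by
  by_cases hnil : paths = []
  · subst hnil
    rw [validate_paths, if_pos rfl]
    simp [cellsAt]
  · rw [validate_paths, if_neg hnil]
    show vaOuter grid (if grid.length > 0 then ((grid.headD []).length : Int) else 0)
        (grid.length : Int) paths
        (List.range ((paths.map (fun p => p.2.length)).foldl max 0)) = true ↔ _
    set w := if grid.length > 0 then ((grid.headD []).length : Int) else 0 with hw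
    set maxLen : Nat := (paths.map (fun p => p.2.length)).foldl max 0 with hml
    rw [vaOuter_iff]
    have hbound : ∀ p ∈ paths, p.2.length ≤ maxLen := by
      intro p hp
      exact (PySem.List.le_foldl_max (paths.map (fun p => p.2.length)) 0).2 _
        (List.mem_map.mpr ⟨p, hp, rfl⟩)
    constructor
    · intro hall t
      by_cases ht : t < maxLen
      · have := (vaInner_iff grid w (grid.length : Int) t paths PySem.Set.empty).mp
          (hall t (List.mem_range.mpr ht))
        exact ⟨fun c hc => (this.1 c hc).1, this.2⟩
      · rw [cellsAt_large paths t (fun p hp => le_trans (hbound p hp) (by omega))]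
        exact ⟨by simp, List.nodup_nil⟩
    · intro hall t _
      rw [vaInner_iff]
      exact ⟨fun c hc => ⟨(hall t).1 c hc, by simp [PySem.Set.empty]⟩, (hall t).2⟩

theorem validate_paths_alt_iff (paths : List (Int × List (Int × Int))) (grid : List (List Int)) :
    validate_paths_alt paths grid = true ↔
      ∀ t : Nat, (∀ c ∈ cellsAt t paths,
          cellOK grid (if grid.length > 0 then ((grid.headD []).length : Int) else 0)
            (grid.length : Int) c) ∧ (cellsAt t paths).Nodup := by
  have hwidth : (if grid ≠ [] then ((grid.headD []).length : Int) else 0)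
      = (if grid.length > 0 then ((grid.headD []).length : Int) else 0) := by
    cases grid <;> simp
  rw [validate_paths_alt]
  show (vbValid grid _ _ _ && _) = true ↔ _
  rw [Bool.and_eq_true, beq_iff_eq, hwidth]
  set w := if grid.length > 0 then ((grid.headD []).length : Int) else 0 with hw
  set cells := paths.flatMap (fun p => PySem.List.enumerate p.2 0) with hcells
  rw [vbValid_iff]
  rw [show PySem.Set.len (PySem.Set.ofList cells) = ((PySem.Set.ofList cells).length : Int) from rfl,
    show ((cells.length : Nat) : Int) = ((cells.length : Nat) : Int) from rfl, Nat.cast_inj,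
    ofList_length_iff, flat_nodup_iff]
  constructor
  · rintro ⟨hvalid, hnd⟩ t
    refine ⟨fun c hc => ?_, hnd t⟩
    exact hvalid ((t : Int), c) ((mem_flat_iff paths t c).mpr ⟨t, rfl, hc⟩)
  · intro hall
    refine ⟨fun tc htc => ?_, fun t => (hall t).2⟩
    obtain ⟨i, c⟩ := tc
    obtain ⟨t, rfl, hc⟩ := (mem_flat_iff paths i c).mp htc
    exact (hall t).1 c hc

-- ===== VERDICT (by name: the statement is the Claim_ definition above) =====
theorem validate_paths_spec : Claim_equal_validate_paths := by
  intro paths grid _ _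
  unfold Spec_validate_paths
  rw [Bool.eq_iff_iff, validate_paths_iff, validate_paths_alt_iff]
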